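-- pv_equiv track=rewrite | github.com/bcronmiller/vanguard-league | backend/app/services/tournament_engine.py | _guaranteed_pairing
-- ===== SOURCE A (Python) =====
-- from typing import List, Dict, Optional, Tuple
--
-- def _guaranteed_pairing(
--
--     standings: Dict[int, Dict],
--     matchup_history: Dict[int, set],
--     max_rematches: int
-- ) -> List[Tuple[int, Optional[int]]]:
--     """
--     Create pairings for guaranteed matches format.
--
--     Similar to Swiss pairing but allows controlled rematches up to max_rematches.
--     Pairs fighters with similar records when possible.
--
--     Args:
--         standings: Current standings {player_id: {wins, losses, draws, points}}
--         matchup_history: History of who has faced whom {player_id: set of opponent_ids}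
--         max_rematches: Maximum number of times two fighters can face each other
--
--     Returns:
--         List of (player_a_id, player_b_id) tuples (player_b_id may be None for bye)
--     """
--     # Count how many times each pair has faced each other
--     rematch_counts = {}
--     for p1 in standings:
--         for p2 in matchup_history.get(p1, set()):
--             # Create a consistent key (smaller ID first)
--             pair = tuple(sorted([p1, p2]))
--             rematch_counts[pair] = rematch_counts.get(pair, 0) + 1
--
--     # Sort players by record (points desc, then wins desc)
--     sorted_players = sorted(
--         standings.items(),
--         key=lambda x: (x[1]["points"], x[1]["wins"]),
--         reverse=True
--     )
--
--     player_ids = [p[0] for p in sorted_players]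
--     paired = set()
--     pairings = []
--
--     for i, player_id in enumerate(player_ids):
--         if player_id in paired:
--             continue
--
--         # Find best available opponent
--         opponent_id = None
--
--         # First pass: try to find opponent within rematch limit
--         for j in range(i + 1, len(player_ids)):
--             candidate = player_ids[j]
--             if candidate in paired:
--                 continue
--
--             # Check rematch count
--             pair = tuple(sorted([player_id, candidate]))
--             rematch_count = rematch_counts.get(pair, 0)
--
--             if rematch_count < max_rematches:
--                 opponent_id = candidate
--                 break
--
--         # Second pass: if no valid opponent found, take first available
--         # (This allows exceeding rematch limit as last resort)
--         if opponent_id is None: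
--             for j in range(i + 1, len(player_ids)):
--                 candidate = player_ids[j]
--                 if candidate not in paired:
--                     opponent_id = candidate
--                     break
--
--         if opponent_id:
--             pairings.append((player_id, opponent_id))
--             paired.add(player_id)
--             paired.add(opponent_id)
--         else:
--             # Odd number of players remaining, this player gets a bye
--             pairings.append((player_id, None))
--             paired.add(player_id)
--
--     return pairings
-- ===== SOURCE B (Python) =====
-- def _guaranteed_pairing(standings, matchup_history, max_rematches):
--     # Greedy pairing restated as consumption of the remaining-players list: no
--     # 'paired' set, no enumerate/index bookkeeping and no precomputed
--     # rematch_counts table -- the chosen opponent is simply removed from the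
--     # remaining list, and the symmetric rematch count for a pair is read
--     # directly from matchup_history with two membership tests.
--     def rematches(a, b):
--         return (b in matchup_history.get(a, ())) + (a in matchup_history.get(b, ()))
--
--     remaining = [pid for pid, _ in sorted(standings.items(),
--                                           key=lambda x: (x[1]["points"], x[1]["wins"]),
--                                           reverse=True)]
--     pairings = []
--     while remaining:
--         pid, *rest = remaining
--         opponent_id = next((c for c in rest if rematches(pid, c) < max_rematches),
--                            rest[0] if rest else None)
--         if opponent_id:
--             pairings.append((pid, opponent_id))
--             rest.remove(opponent_id)
--         else:
--             pairings.append((pid, None))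
--         remaining = rest
--     return pairings
-- ===== Notes on version B (the rewrite author's own statement) =====
-- stated objective: alternative
-- what changed: B restates the greedy as consumption of the remaining-players list: the paired set, the enumerate/index scans and the precomputed rematch_counts table all disappear -- each step destructures the list head, picks the first acceptable candidate (with the first element as fallback) via a single generator expression reading the symmetric rematch count directly from matchup_history, and removes the chosen opponent from the list.
import Mathlib
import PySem

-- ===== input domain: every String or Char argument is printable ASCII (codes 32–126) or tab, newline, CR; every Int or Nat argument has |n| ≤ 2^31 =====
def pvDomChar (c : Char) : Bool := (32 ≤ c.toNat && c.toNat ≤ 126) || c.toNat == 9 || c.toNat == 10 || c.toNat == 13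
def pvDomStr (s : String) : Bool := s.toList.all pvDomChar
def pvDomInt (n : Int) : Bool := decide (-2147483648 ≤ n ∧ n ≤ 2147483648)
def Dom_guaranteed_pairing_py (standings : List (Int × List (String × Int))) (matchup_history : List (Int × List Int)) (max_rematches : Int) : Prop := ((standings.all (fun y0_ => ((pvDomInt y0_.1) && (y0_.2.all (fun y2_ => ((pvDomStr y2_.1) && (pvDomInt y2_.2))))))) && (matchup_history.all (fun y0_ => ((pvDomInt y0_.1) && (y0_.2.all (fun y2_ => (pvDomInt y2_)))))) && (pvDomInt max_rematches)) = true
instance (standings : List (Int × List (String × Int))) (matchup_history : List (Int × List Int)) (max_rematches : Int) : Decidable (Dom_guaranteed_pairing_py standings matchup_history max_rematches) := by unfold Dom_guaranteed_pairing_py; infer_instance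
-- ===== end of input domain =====

-- B restates the greedy as consumption of the remaining-players list (no paired set, no
-- index scans, no rematch_counts table; the chosen opponent is removed from the list and
-- the rematch count is read directly from matchup_history); objective: alternative.
-- Equivalence of the RETURN value on inputs where A returns (Pre_).

-- ===== PORT A =====
-- tuple(sorted([a, b]))
def pyPairA (a b : Int) : Int × Int := if a ≤ b then (a, b) else (b, a)

-- first pass: first unpaired candidate within the rematch limit
def pyScanLimitA (counts : PySem.Dict (Int × Int) Int) (max_rematches pid : Int)
    (paired : PySem.Set Int) : List Int → Option Int
  | [] => none
  | c :: rest =>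
    if PySem.Set.contains paired c then pyScanLimitA counts max_rematches pid paired rest
    else if counts.getD (pyPairA pid c) 0 < max_rematches then some c
    else pyScanLimitA counts max_rematches pid paired rest

-- second pass: first unpaired candidate
def pyScanAvailA (paired : PySem.Set Int) : List Int → Option Int
  | [] => none
  | c :: rest => if PySem.Set.contains paired c then pyScanAvailA paired rest else some c

-- the main 'for i, player_id in enumerate(player_ids)' loop (candidates = tail of the list)
def pyLoopA (counts : PySem.Dict (Int × Int) Int) (max_rematches : Int) :
    List Int → PySem.Set Int → List (Int × Option Int) → List (Int × Option Int)
  | [], _, pairings => pairings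
  | pid :: rest, paired, pairings =>
    if PySem.Set.contains paired pid then pyLoopA counts max_rematches rest paired pairings
    else
      let opponent_id : Option Int :=
        match pyScanLimitA counts max_rematches pid paired rest with
        | some c => some c
        | none => pyScanAvailA paired rest
      match opponent_id with
      | some o =>
        if o ≠ 0 then   -- 'if opponent_id:' truthiness
          pyLoopA counts max_rematches rest (PySem.Set.add (PySem.Set.add paired pid) o)
            (pairings ++ [(pid, some o)])
        else
          pyLoopA counts max_rematches rest (PySem.Set.add paired pid) (pairings ++ [(pid, none)])
      | none =>
        pyLoopA counts max_rematches rest (PySem.Set.add paired pid) (pairings ++ [(pid, none)])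

def guaranteed_pairing_py (standings : List (Int × List (String × Int))) (matchup_history : List (Int × List Int)) (max_rematches : Int) : List (Int × Option Int) :=
  -- marshal the two Python dict arguments (overwrite on duplicate keys, set values deduplicated)
  let std : PySem.Dict Int (PySem.Dict String Int) :=
    PySem.Dict.ofList (standings.map (fun p => (p.1, PySem.Dict.ofList p.2)))
  let hist : PySem.Dict Int (PySem.Set Int) :=
    PySem.Dict.ofList (matchup_history.map (fun p => (p.1, PySem.Set.ofList p.2)))
  -- rematch_counts: nested loop over standings keys and matchup_history sets
  let rematch_counts : PySem.Dict (Int × Int) Int :=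
    std.keys.foldl (fun d p1 =>
      (hist.getD p1 PySem.Set.empty).foldl (fun d p2 =>
        d.insert (pyPairA p1 p2) (d.getD (pyPairA p1 p2) 0 + 1)) d) PySem.Dict.empty
  -- sort by (points, wins) descending  (getD is total under Pre_: both keys present)
  let sorted_players := PySem.List.sorted2 std.items
    (fun x => x.2.getD "points" 0) (fun x => x.2.getD "wins" 0) true
  let player_ids := sorted_players.map (fun p => p.1)
  pyLoopA rematch_counts max_rematches player_ids PySem.Set.empty []

-- ===== PORT B =====
-- (c in matchup_history.get(a, ())) + (a in matchup_history.get(c, ()))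
def altRematches (hist : PySem.Dict Int (PySem.Set Int)) (a b : Int) : Int :=
  (if PySem.Set.contains (hist.getD a PySem.Set.empty) b then 1 else 0) +
  (if PySem.Set.contains (hist.getD b PySem.Set.empty) a then 1 else 0)

-- the generator expression: first c in rest with rematches(pid, c) < max_rematches
def altAcc (hist : PySem.Dict Int (PySem.Set Int)) (mr pid : Int) : List Int → Option Int
  | [] => none
  | c :: rest => if altRematches hist pid c < mr then some c else altAcc hist mr pid rest

-- next(generator, rest[0] if rest else None)
def altChoose (hist : PySem.Dict Int (PySem.Set Int)) (mr pid : Int) (rest : List Int) : Option Int :=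
  match altAcc hist mr pid rest with
  | some c => some c
  | none => rest.head?

-- the 'while remaining:' loop; 'rest.remove(opponent_id)' = List.erase (always present here)
def altLoop (hist : PySem.Dict Int (PySem.Set Int)) (mr : Int) : List Int → List (Int × Option Int)
  | [] => []
  | pid :: rest =>
    match altChoose hist mr pid rest with
    | some o =>
      if o ≠ 0 then   -- 'if opponent_id:' truthiness
        (pid, some o) :: altLoop hist mr (rest.erase o)
      else (pid, none) :: altLoop hist mr rest
    | none => (pid, none) :: altLoop hist mr rest
termination_by l => l.length
decreasing_by
  all_goals simp only [List.length_cons]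
  all_goals first
    | exact Nat.lt_succ_of_le ((List.erase_sublist).length_le)
    | exact Nat.lt_succ_self _

def guaranteed_pairing_py_alt (standings : List (Int × List (String × Int))) (matchup_history : List (Int × List Int)) (max_rematches : Int) : List (Int × Option Int) :=
  let std : PySem.Dict Int (PySem.Dict String Int) :=
    PySem.Dict.ofList (standings.map (fun p => (p.1, PySem.Dict.ofList p.2)))
  let hist : PySem.Dict Int (PySem.Set Int) :=
    PySem.Dict.ofList (matchup_history.map (fun p => (p.1, PySem.Set.ofList p.2)))
  let remaining := (PySem.List.sorted2 std.items
    (fun x => x.2.getD "points" 0) (fun x => x.2.getD "wins" 0) true).map (fun p => p.1)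
  altLoop hist max_rematches remaining

-- ===== PRECONDITION & SPEC =====
-- Pre_ excludes exactly the inputs where Python A raises KeyError: some player's record
-- (after dict marshalling) lacks the "points" or "wins" key used by the sort.
def Pre_guaranteed_pairing_py (standings : List (Int × List (String × Int))) (matchup_history : List (Int × List Int)) (max_rematches : Int) : Prop :=
  ∀ kv ∈ (PySem.Dict.ofList (standings.map (fun p => (p.1, PySem.Dict.ofList p.2)))).items,
    kv.2.contains "points" = true ∧ kv.2.contains "wins" = true
instance (standings : List (Int × List (String × Int))) (matchup_history : List (Int × List Int)) (max_rematches : Int) : Decidable (Pre_guaranteed_pairing_py standings matchup_history max_rematches) := by unfold Pre_guaranteed_pairing_py; infer_instance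

def pvWitness_guaranteed_pairing_py : (List (Int × List (String × Int))) × (List (Int × List Int)) × Int :=
  ([(1, [("points", 3), ("wins", 1)]), (2, [("points", 0), ("wins", 0)])], [(1, [2]), (2, [1])], 1)

def Spec_guaranteed_pairing_py (standings : List (Int × List (String × Int))) (matchup_history : List (Int × List Int)) (max_rematches : Int) (out : List (Int × Option Int)) : Prop := out = guaranteed_pairing_py_alt standings matchup_history max_rematches
instance (standings : List (Int × List (String × Int))) (matchup_history : List (Int × List Int)) (max_rematches : Int) (out : List (Int × Option Int)) : Decidable (Spec_guaranteed_pairing_py standings matchup_history max_rematches out) := by unfold Spec_guaranteed_pairing_py; infer_instance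

-- ===== CLAIM (what is proved, stated in full; the proofs are below) =====
def Claim_equal_guaranteed_pairing_py : Prop := ∀ (standings : List (Int × List (String × Int))) (matchup_history : List (Int × List Int)) (max_rematches : Int), Dom_guaranteed_pairing_py standings matchup_history max_rematches → Pre_guaranteed_pairing_py standings matchup_history max_rematches → Spec_guaranteed_pairing_py standings matchup_history max_rematches (guaranteed_pairing_py standings matchup_history max_rematches)

-- ===== LEMMAS AND PROOFS =====

-- pyPairA is min/max
theorem pyPairA_eq (a b : Int) : pyPairA a b = (min a b, max a b) := by
  unfold pyPairA; split <;> simp [Prod.ext_iff] <;> omega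

theorem pyPairA_eq_iff {pid c : Int} (_h : pid ≠ c) (p1 p2 : Int) :
    pyPairA p1 p2 = pyPairA pid c ↔ (p1 = pid ∧ p2 = c) ∨ (p1 = c ∧ p2 = pid) := by
  simp only [pyPairA_eq, Prod.mk.injEq]; omega

theorem values_foldl_insert {κ ν : Type} [BEq κ] [LawfulBEq κ] (l : List (κ × ν)) :
    ∀ (d : PySem.Dict κ ν) (w : ν), w ∈ (l.foldl (fun acc p => acc.insert p.1 p.2) d).values →
      w ∈ d.values ∨ w ∈ l.map (·.2) := by
  induction l with
  | nil => intro d w h; exact Or.inl h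
  | cons p t ih =>
    intro d w h
    simp only [List.foldl_cons] at h
    rcases ih _ _ h with h' | h'
    · rcases PySem.Dict.mem_values_insert _ _ _ _ h' with rfl | h''
      · exact Or.inr (by simp)
      · exact Or.inl h''
    · exact Or.inr (by simp [h'])

theorem values_ofList {κ ν : Type} [BEq κ] [LawfulBEq κ] (l : List (κ × ν)) :
    ∀ w ∈ (PySem.Dict.ofList l).values, w ∈ l.map (·.2) := by
  intro w h
  rcases values_foldl_insert l PySem.Dict.empty w h with h' | h'
  · simp [PySem.Dict.empty, PySem.Dict.values] at h'
  · exact h'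

theorem hist_getD_nodup (matchup_history : List (Int × List Int)) (p : Int) :
    ((PySem.Dict.ofList (matchup_history.map (fun p => (p.1, PySem.Set.ofList p.2)))).getD p
      PySem.Set.empty).Nodup := by
  rw [PySem.Dict.getD_eq_get?_getD]
  cases heq : (PySem.Dict.ofList (matchup_history.map (fun p => (p.1, PySem.Set.ofList p.2)))).get? p with
  | none => simp [PySem.Set.empty]
  | some v =>
    have hv : v ∈ (matchup_history.map (fun p => (p.1, PySem.Set.ofList p.2))).map (·.2) := by
      apply values_ofList
      have := PySem.Dict.mem_items_of_get?_eq_some _ heq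
      simp only [PySem.Dict.values]
      exact List.mem_map.mpr ⟨_, this, rfl⟩
    simp only [List.map_map, List.mem_map] at hv
    obtain ⟨q, _, rfl⟩ := hv
    simp only [PySem.Set]
    exact PySem.Set.nodup_ofList q.2

theorem count_map_pair {pid c : Int} (hne : pid ≠ c) (m : List Int) (hm : m.Nodup) (a : Int) :
    (m.map (pyPairA a)).count (pyPairA pid c) =
      if a = pid then (if c ∈ m then 1 else 0)
      else if a = c then (if pid ∈ m then 1 else 0) else 0 := by
  have hcount : ∀ x : Int, x ∈ m → (pyPairA a x = pyPairA pid c ↔ (a = pid ∧ x = c) ∨ (a = c ∧ x = pid)) :=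
    fun x _ => pyPairA_eq_iff hne a x
  by_cases h1 : a = pid
  · subst h1
    have : (m.map (pyPairA a)).count (pyPairA a c) = m.count c := by
      simp only [List.count, List.countP_map]
      apply List.countP_congr
      intro x hx
      simp only [Function.comp_apply, beq_iff_eq]
      rw [hcount x hx]
      constructor
      · rintro (⟨_, rfl⟩ | ⟨h, _⟩); · rfl
        · exact absurd h hne
      · rintro rfl; exact Or.inl ⟨rfl, rfl⟩
    rw [this]
    by_cases hc : c ∈ m
    · simp [List.count_eq_one_of_mem hm hc, hc]
    · simp [List.count_eq_zero.mpr hc, hc]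
  · by_cases h2 : a = c
    · subst h2
      simp only [if_neg h1]
      have : (m.map (pyPairA a)).count (pyPairA pid a) = m.count pid := by
        simp only [List.count, List.countP_map]
        apply List.countP_congr
        intro x hx
        simp only [Function.comp_apply, beq_iff_eq]
        rw [pyPairA_eq_iff hne a x]
        constructor
        · rintro (⟨h, _⟩ | ⟨_, rfl⟩)
          · exact absurd h (fun h' => hne h'.symm)
          · rfl
        · rintro rfl; exact Or.inr ⟨rfl, rfl⟩
      rw [this]
      by_cases hc : pid ∈ m
      · simp [List.count_eq_one_of_mem hm hc, hc]
      · simp [List.count_eq_zero.mpr hc, hc]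
    · simp only [if_neg h1, if_neg h2]
      rw [List.count_eq_zero]
      intro hmem
      rcases List.mem_map.mp hmem with ⟨x, hx, hEq⟩
      rcases (hcount x hx).mp hEq with ⟨h, _⟩ | ⟨h, _⟩
      · exact h1 h
      · exact h2 h

theorem count_flatMap_pair {pid c : Int} (hne : pid ≠ c) (s : Int → PySem.Set Int)
    (hs : ∀ p, (s p).Nodup) :
    ∀ (l : List Int), l.Nodup →
      (l.flatMap (fun p1 => (s p1).map (pyPairA p1))).count (pyPairA pid c) =
        (if pid ∈ l ∧ c ∈ s pid then 1 else 0) + (if c ∈ l ∧ pid ∈ s c then 1 else 0) := by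
  intro l hl
  induction l with
  | nil => simp
  | cons a t ih =>
    rcases List.nodup_cons.mp hl with ⟨ha, ht⟩
    simp only [List.flatMap_cons, List.count_append, ih ht]
    rw [count_map_pair hne (s a) (hs a) a]
    by_cases h1 : a = pid
    · subst h1
      have : ¬ (a ∈ t) := ha
      simp only [List.mem_cons]
      by_cases hc : c ∈ s a <;> by_cases hct : c ∈ t <;>
        simp_all [hne.symm] <;> omega
    · by_cases h2 : a = c
      · subst h2
        simp only [List.mem_cons]
        by_cases hp : pid ∈ s a <;> by_cases hpt : pid ∈ t <;>
          simp_all <;> omega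
      · simp only [List.mem_cons]
        simp only [or_iff_right (fun h : pid = a => h1 h.symm), or_iff_right (fun h : c = a => h2 h.symm),
          if_neg h1, if_neg h2]
        omega

theorem counts_getD (keys : List Int) (s : Int → PySem.Set Int) (d : PySem.Dict (Int × Int) Int)
    (K : Int × Int) :
    (keys.foldl (fun d p1 =>
        (s p1).foldl (fun d p2 =>
          d.insert (pyPairA p1 p2) (d.getD (pyPairA p1 p2) 0 + 1)) d) d).getD K 0
      = d.getD K 0 + ((keys.flatMap (fun p1 => (s p1).map (pyPairA p1))).count K : Int) := by
  induction keys generalizing d with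
  | nil => simp
  | cons k t ih =>
    simp only [List.foldl_cons, List.flatMap_cons, List.count_append]
    rw [ih]
    have hin := PySem.Dict.getD_foldl_insert_add_one ((s k).map (pyPairA k)) d K
    simp only [List.foldl_map] at hin
    rw [hin]; push_cast; ring

theorem counts_eq (keys : List Int) (hk : keys.Nodup)
    (s : Int → PySem.Set Int) (hs : ∀ p, (s p).Nodup)
    {pid c : Int} (hpid : pid ∈ keys) (hc : c ∈ keys) (hne : pid ≠ c) :
    (keys.foldl (fun d p1 =>
        (s p1).foldl (fun d p2 =>
          d.insert (pyPairA p1 p2) (d.getD (pyPairA p1 p2) 0 + 1)) d)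
        (PySem.Dict.empty : PySem.Dict (Int × Int) Int)).getD (pyPairA pid c) 0
      = ((if c ∈ s pid then 1 else 0) + (if pid ∈ s c then 1 else 0) : Int) := by
  have h := counts_getD keys s PySem.Dict.empty (pyPairA pid c)
  refine h.trans ?_
  rw [count_flatMap_pair hne s hs keys hk]
  simp only [PySem.Dict.getD_empty, hpid, hc, true_and]
  split <;> split <;> norm_num

-- A's first scan over the tail = B's generator over the tail with paired members removed
theorem scanLimit_eq_altAcc (hist : PySem.Dict Int (PySem.Set Int))
    (counts : PySem.Dict (Int × Int) Int) (mr pid : Int) (paired : PySem.Set Int)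
    (P : Int → Prop)
    (hE : ∀ c, P c → c ≠ pid → counts.getD (pyPairA pid c) 0 = altRematches hist pid c) :
    ∀ (cs : List Int), (∀ c ∈ cs, P c ∧ c ≠ pid) →
      pyScanLimitA counts mr pid paired cs =
        altAcc hist mr pid (cs.filter (fun x => !(PySem.Set.contains paired x))) := by
  intro cs
  induction cs with
  | nil => intro _; rfl
  | cons c rest ih =>
    intro hcs
    obtain ⟨⟨hPc, hcpid⟩, hrest⟩ : (P c ∧ c ≠ pid) ∧ ∀ x ∈ rest, P x ∧ x ≠ pid :=
      ⟨hcs c (by simp), fun x hx => hcs x (by simp [hx])⟩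
    by_cases hp : PySem.Set.contains paired c = true
    · rw [List.filter_cons_of_neg (by rw [hp]; decide)]
      show (if PySem.Set.contains paired c = true then pyScanLimitA counts mr pid paired rest
            else if counts.getD (pyPairA pid c) 0 < mr then some c
            else pyScanLimitA counts mr pid paired rest) = _
      rw [if_pos hp]
      exact ih hrest
    · rw [List.filter_cons_of_pos (by rw [Bool.eq_false_iff.mpr hp]; decide)]
      show (if PySem.Set.contains paired c = true then pyScanLimitA counts mr pid paired rest
            else if counts.getD (pyPairA pid c) 0 < mr then some c
            else pyScanLimitA counts mr pid paired rest) = _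
      rw [if_neg hp]
      show _ = (if altRematches hist pid c < mr then some c else altAcc hist mr pid (rest.filter _))
      rw [hE c hPc hcpid]
      split
      · rfl
      · exact ih hrest

-- A's second scan = head of the filtered tail
theorem scanAvail_eq_head (paired : PySem.Set Int) :
    ∀ (cs : List Int), pyScanAvailA paired cs =
      (cs.filter (fun x => !(PySem.Set.contains paired x))).head? := by
  intro cs
  induction cs with
  | nil => rfl
  | cons c rest ih =>
    by_cases hp : PySem.Set.contains paired c = true
    · rw [List.filter_cons_of_neg (by rw [hp]; decide)]
      show (if PySem.Set.contains paired c = true then pyScanAvailA paired rest else some c) = _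
      rw [if_pos hp]
      exact ih
    · rw [List.filter_cons_of_pos (by rw [Bool.eq_false_iff.mpr hp]; decide)]
      show (if PySem.Set.contains paired c = true then pyScanAvailA paired rest else some c) = _
      rw [if_neg hp]
      rfl

theorem contains_add (s : PySem.Set Int) (a x : Int) :
    PySem.Set.contains (PySem.Set.add s a) x = (PySem.Set.contains s x || decide (x = a)) := by
  have hiff := PySem.Set.mem_add s a x
  have h1 := PySem.Set.contains_iff (PySem.Set.add s a) x
  have h2 := PySem.Set.contains_iff s x
  by_cases hm : x ∈ PySem.Set.add s a
  · rw [h1.mpr hm]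
    rcases hiff.mp hm with h | h
    · rw [h2.mpr h]; rfl
    · simp [h]
  · rw [Bool.eq_false_iff.mpr (fun hc => hm (h1.mp hc))]
    have hxs : x ∉ s := fun hx => hm (hiff.mpr (Or.inl hx))
    have ha : x ≠ a := fun hx => hm (hiff.mpr (Or.inr hx))
    simp [hxs, ha]

theorem filter_add_of_not_mem (paired : PySem.Set Int) (a : Int) (l : List Int) (ha : a ∉ l) :
    l.filter (fun x => !(PySem.Set.contains (PySem.Set.add paired a) x)) =
      l.filter (fun x => !(PySem.Set.contains paired x)) := by
  apply List.filter_congr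
  intro x hx
  have hxa : x ≠ a := fun h => ha (h ▸ hx)
  rw [contains_add]
  simp [hxa]

theorem filter_add_eq_erase (paired : PySem.Set Int) (o : Int) (l : List Int) (hl : l.Nodup) :
    l.filter (fun x => !(PySem.Set.contains (PySem.Set.add paired o) x)) =
      (l.filter (fun x => !(PySem.Set.contains paired x))).erase o := by
  rw [(List.Nodup.filter _ hl).erase_eq_filter, List.filter_filter]
  apply List.filter_congr
  intro x _
  rw [contains_add]
  by_cases hxo : x = o
  · simp [hxo]
  · simp [hxo]

-- main bridge: A's loop over ids with a paired set = B's loop over the unpaired remainder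
theorem loop_bridge (hist : PySem.Dict Int (PySem.Set Int))
    (counts : PySem.Dict (Int × Int) Int) (mr : Int) (P : Int → Prop)
    (hE : ∀ p c, P p → P c → p ≠ c → counts.getD (pyPairA p c) 0 = altRematches hist p c) :
    ∀ (ids : List Int) (paired : PySem.Set Int) (acc : List (Int × Option Int)),
      ids.Nodup → (∀ x ∈ ids, P x) →
      pyLoopA counts mr ids paired acc =
        acc ++ altLoop hist mr (ids.filter (fun x => !(PySem.Set.contains paired x))) := by
  intro ids
  induction ids with
  | nil => intro paired acc _ _; simp [pyLoopA, altLoop]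
  | cons pid rest ih =>
    intro paired acc hnd hP
    rcases List.nodup_cons.mp hnd with ⟨hpid, hrestnd⟩
    have hPrest : ∀ x ∈ rest, P x := fun x hx => hP x (by simp [hx])
    by_cases hp : PySem.Set.contains paired pid = true
    · rw [List.filter_cons_of_neg (by rw [hp]; decide)]
      simp only [pyLoopA, hp, if_true]
      exact ih paired acc hrestnd hPrest
    · have hscan := scanLimit_eq_altAcc hist counts mr pid paired P
        (fun c hc hne => hE pid c (hP pid (by simp)) hc (fun h => hne h.symm)) rest
        (fun c hc => ⟨hPrest c hc, fun h => hpid (h ▸ hc)⟩)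
      have havail := scanAvail_eq_head paired rest
      rw [List.filter_cons_of_pos (by rw [Bool.eq_false_iff.mpr hp]; decide)]
      simp only [pyLoopA, hp, if_false, altLoop, altChoose, hscan, havail]
      cases h1 : altAcc hist mr pid (rest.filter (fun x => !(PySem.Set.contains paired x))) with
      | some c =>
        show (if c ≠ 0 then pyLoopA counts mr rest ((paired.add pid).add c) (acc ++ [(pid, some c)])
              else pyLoopA counts mr rest (paired.add pid) (acc ++ [(pid, none)]))
            = acc ++ (if c ≠ 0 then
                (pid, some c) :: altLoop hist mr ((rest.filter (fun x => !(PySem.Set.contains paired x))).erase c)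
              else (pid, none) :: altLoop hist mr (rest.filter (fun x => !(PySem.Set.contains paired x))))
        split_ifs with hz
        · rw [ih _ _ hrestnd hPrest, filter_add_eq_erase (paired.add pid) c rest hrestnd,
            filter_add_of_not_mem paired pid rest hpid]
          simp
        · rw [ih _ _ hrestnd hPrest, filter_add_of_not_mem _ pid rest hpid]
          simp
      | none =>
        cases h2 : (rest.filter (fun x => !(PySem.Set.contains paired x))).head? with
        | some o =>
          show (if o ≠ 0 then pyLoopA counts mr rest ((paired.add pid).add o) (acc ++ [(pid, some o)])
                else pyLoopA counts mr rest (paired.add pid) (acc ++ [(pid, none)]))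
              = acc ++ (if o ≠ 0 then
                  (pid, some o) :: altLoop hist mr ((rest.filter (fun x => !(PySem.Set.contains paired x))).erase o)
                else (pid, none) :: altLoop hist mr (rest.filter (fun x => !(PySem.Set.contains paired x))))
          split_ifs with hz
          · rw [ih _ _ hrestnd hPrest, filter_add_eq_erase (paired.add pid) o rest hrestnd,
              filter_add_of_not_mem paired pid rest hpid]
            simp
          · rw [ih _ _ hrestnd hPrest, filter_add_of_not_mem _ pid rest hpid]
            simp
        | none =>
          show pyLoopA counts mr rest (paired.add pid) (acc ++ [(pid, none)])
              = acc ++ (pid, none) :: altLoop hist mr (rest.filter (fun x => !(PySem.Set.contains paired x)))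
          rw [ih _ _ hrestnd hPrest, filter_add_of_not_mem _ pid rest hpid]
          simp

theorem filter_empty_set (l : List Int) :
    l.filter (fun x => !(PySem.Set.contains (PySem.Set.empty : PySem.Set Int) x)) = l := by
  apply List.filter_eq_self.mpr
  intro x _
  simp [PySem.Set.empty, PySem.Set.contains]

-- ===== VERDICT (by name: the statement is the Claim_ definition above) =====
theorem guaranteed_pairing_py_spec : Claim_equal_guaranteed_pairing_py := by
  intro standings matchup_history max_rematches _ _
  unfold Spec_guaranteed_pairing_py guaranteed_pairing_py guaranteed_pairing_py_alt
  have hperm : ((PySem.List.sorted2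
        (PySem.Dict.ofList (standings.map (fun p => (p.1, PySem.Dict.ofList p.2)))).items
        (fun x => x.2.getD "points" 0) (fun x => x.2.getD "wins" 0) true).map (fun p => p.1)).Perm
      (PySem.Dict.ofList (standings.map (fun p => (p.1, PySem.Dict.ofList p.2)))).keys := by
    exact (PySem.List.sorted2_perm _ _ _ _).map _
  have hnd := hperm.nodup_iff.mpr (PySem.Dict.nodup_keys_ofList _)
  have hmem : ∀ x ∈ (PySem.List.sorted2
        (PySem.Dict.ofList (standings.map (fun p => (p.1, PySem.Dict.ofList p.2)))).items
        (fun x => x.2.getD "points" 0) (fun x => x.2.getD "wins" 0) true).map (fun p => p.1),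
      x ∈ (PySem.Dict.ofList (standings.map (fun p => (p.1, PySem.Dict.ofList p.2)))).keys :=
    fun x hx => hperm.mem_iff.mp hx
  have hE : ∀ p c,
      p ∈ (PySem.Dict.ofList (standings.map (fun p => (p.1, PySem.Dict.ofList p.2)))).keys →
      c ∈ (PySem.Dict.ofList (standings.map (fun p => (p.1, PySem.Dict.ofList p.2)))).keys →
      p ≠ c →
      ((PySem.Dict.ofList (standings.map (fun p => (p.1, PySem.Dict.ofList p.2)))).keys.foldl
        (fun d p1 =>
          ((PySem.Dict.ofList (matchup_history.map (fun p => (p.1, PySem.Set.ofList p.2)))).getD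
              p1 PySem.Set.empty).foldl (fun d p2 =>
            d.insert (pyPairA p1 p2) (d.getD (pyPairA p1 p2) 0 + 1)) d)
        PySem.Dict.empty).getD (pyPairA p c) 0
        = altRematches
            (PySem.Dict.ofList (matchup_history.map (fun p => (p.1, PySem.Set.ofList p.2)))) p c := by
    intro p c hp hc hne
    have h := counts_eq
      (PySem.Dict.ofList (standings.map (fun p => (p.1, PySem.Dict.ofList p.2)))).keys
      (PySem.Dict.nodup_keys_ofList _)
      (fun q => (PySem.Dict.ofList (matchup_history.map (fun p => (p.1, PySem.Set.ofList p.2)))).getD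
        q PySem.Set.empty)
      (fun q => hist_getD_nodup matchup_history q) hp hc hne
    refine h.trans ?_
    simp only [altRematches, PySem.Set.contains_eq_listContains, List.contains_iff_mem,
      PySem.Set.empty]
    split_ifs <;> rfl
  have h := loop_bridge _ _ max_rematches
    (fun x => x ∈ (PySem.Dict.ofList (standings.map (fun p => (p.1, PySem.Dict.ofList p.2)))).keys)
    hE _ PySem.Set.empty [] hnd hmem
  rw [h, filter_empty_set]
  simp
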